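-- pv_equiv track=rewrite | github.com/vicpebarragan/proyecto1p | lap_follower_node.py | find_largest_gap
-- ===== SOURCE A (Python) =====
-- def find_largest_gap(valid_mask):
--     """
--     Devuelve (inicio, fin) del mayor segmento continuo donde valid_mask == True
--     """
--     max_len = 0
--     max_range = None
--     current_start = None
--
--     for i, valid in enumerate(valid_mask):
--         if valid:
--             if current_start is None:
--                 current_start = i
--         else:
--             if current_start is not None:
--                 current_len = i - current_start
--                 if current_len > max_len:
--                     max_len = current_len
--                     max_range = (current_start, i - 1)
--                 current_start = None
--
--     # Por si termina en True
--     if current_start is not None: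
--         current_len = len(valid_mask) - current_start
--         if current_len > max_len:
--             max_range = (current_start, len(valid_mask) - 1)
--
--     return max_range
-- ===== SOURCE B (Python) =====
-- from itertools import groupby
--
-- def find_largest_gap(valid_mask):
--     best = None
--     best_len = 0
--     for key, grp in groupby(enumerate(valid_mask), key=lambda p: bool(p[1])):
--         if key:
--             idxs = [i for i, _ in grp]
--             start, length = idxs[0], len(idxs)
--             if length > best_len:
--                 best_len = length
--                 best = (start, start + length - 1)
--     return best
-- ===== Notes on version B (the rewrite author's own statement) =====
-- stated objective: idiomatic
-- what changed: Replaces A's stateful element-by-element sweep (current_start bookkeeping plus a trailing fix-up) by splitting the mask into maximal runs with itertools.groupby and keeping the first strictly longest True run.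
import Mathlib
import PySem

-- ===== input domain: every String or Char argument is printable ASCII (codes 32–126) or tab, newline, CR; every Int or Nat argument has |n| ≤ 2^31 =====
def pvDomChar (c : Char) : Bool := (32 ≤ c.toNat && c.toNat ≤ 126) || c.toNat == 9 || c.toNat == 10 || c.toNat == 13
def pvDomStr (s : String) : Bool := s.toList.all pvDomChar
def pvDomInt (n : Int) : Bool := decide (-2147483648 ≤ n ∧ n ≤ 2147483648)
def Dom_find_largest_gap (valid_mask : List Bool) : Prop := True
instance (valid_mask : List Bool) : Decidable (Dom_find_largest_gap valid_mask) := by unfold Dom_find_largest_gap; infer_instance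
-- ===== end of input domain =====

-- B replaces A's stateful sweep by a groupby-style split into maximal runs followed by a
-- first-strict-max scan; same O(n) cost, more idiomatic decomposition.

-- ===== PORT A =====
-- the for-loop of A as structural recursion over the mask, carrying (i, max_len, max_range, current_start)
def pvLoopA (xs : List Bool) (i : Int) (maxLen : Int) (maxRange : Option (Int × Int))
    (curStart : Option Int) : Int × Option (Int × Int) × Option Int :=
  match xs with
  | [] => (maxLen, maxRange, curStart)
  | v :: rest =>
    if v then
      match curStart with
      | none => pvLoopA rest (i + 1) maxLen maxRange (some i)
      | some s => pvLoopA rest (i + 1) maxLen maxRange (some s)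
    else
      match curStart with
      | none => pvLoopA rest (i + 1) maxLen maxRange none
      | some s =>
        if i - s > maxLen then pvLoopA rest (i + 1) (i - s) (some (s, i - 1)) none
        else pvLoopA rest (i + 1) maxLen maxRange none

-- A's trailing "por si termina en True" fix-up
def pvFinA (n : Int) (st : Int × Option (Int × Int) × Option Int) : Option (Int × Int) :=
  match st.2.2 with
  | none => st.2.1
  | some s => if n - s > st.1 then some (s, n - 1) else st.2.1

def find_largest_gap (valid_mask : List Bool) : Option (Int × Int) :=
  pvFinA (valid_mask.length : Int) (pvLoopA valid_mask 0 0 none none)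

-- ===== PORT B =====
-- number of leading elements equal to v (length of the rest of a groupby group)
def pvCountLead (v : Bool) : List Bool → Nat
  | [] => 0
  | x :: t => if x = v then pvCountLead v t + 1 else 0

-- groupby(enumerate(mask)): the maximal runs as (start, length, value)
def pvRuns : List Bool → Int → List (Int × Int × Bool)
  | [], _ => []
  | v :: r, i =>
    let c := pvCountLead v r
    (i, (1 + c : Int), v) :: pvRuns (r.drop c) (i + 1 + (c : Int))
termination_by xs _ => xs.length
decreasing_by
  simp only [List.length_drop, List.length_cons]
  omega

-- the loop of Source B: keep the first True run of strictly greatest length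
def pvBest : List (Int × Int × Bool) → Int → Option (Int × Int) → Option (Int × Int)
  | [], _, best => best
  | (s, l, v) :: rs, bestLen, best =>
    if v then
      if l > bestLen then pvBest rs l (some (s, s + l - 1))
      else pvBest rs bestLen best
    else pvBest rs bestLen best

def find_largest_gap_alt (valid_mask : List Bool) : Option (Int × Int) :=
  pvBest (pvRuns valid_mask 0) 0 none

-- ===== PRECONDITION & SPEC =====
def Spec_find_largest_gap (valid_mask : List Bool) (out : Option (Int × Int)) : Prop := out = find_largest_gap_alt valid_mask
instance (valid_mask : List Bool) (out : Option (Int × Int)) : Decidable (Spec_find_largest_gap valid_mask out) := by unfold Spec_find_largest_gap; infer_instance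

-- ===== CLAIM (what is proved, stated in full; the proofs are below) =====
def Claim_equal_find_largest_gap : Prop := ∀ (valid_mask : List Bool), Dom_find_largest_gap valid_mask → Spec_find_largest_gap valid_mask (find_largest_gap valid_mask)

-- ===== LEMMAS AND PROOFS =====

theorem pvCountLead_le (v : Bool) (xs : List Bool) : pvCountLead v xs ≤ xs.length := by
  induction xs with
  | nil => simp [pvCountLead]
  | cons x t ih => by_cases h : x = v <;> simp [pvCountLead, h] <;> omega

-- while curStart = some s, a block of leading Trues is just skipped over by A's loop
theorem pvLoopA_trueRun (r : List Bool) (j L : Int) (B : Option (Int × Int)) (s : Int) :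
    pvLoopA r j L B (some s)
      = pvLoopA (r.drop (pvCountLead true r)) (j + (pvCountLead true r : Int)) L B (some s) := by
  induction r generalizing j with
  | nil => simp [pvCountLead]
  | cons x t ih =>
    cases x with
    | false => simp [pvCountLead]
    | true =>
      have hcl : pvCountLead true (true :: t) = pvCountLead true t + 1 := by
        simp [pvCountLead]
      rw [hcl]
      have h1 : pvLoopA (true :: t) j L B (some s) = pvLoopA t (j + 1) L B (some s) := by
        simp [pvLoopA]
      rw [h1, ih (j + 1)]
      have h2 : List.drop (pvCountLead true t + 1) (true :: t) = List.drop (pvCountLead true t) t := by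
        simp
      rw [h2]
      congr 1
      push_cast
      ring

-- pvBest ignores a run whose value is False
theorem pvBest_false (s l : Int) (rs : List (Int × Int × Bool)) (L : Int) (B : Option (Int × Int)) :
    pvBest ((s, l, false) :: rs) L B = pvBest rs L B := by
  simp [pvBest]

-- pvBest ignores False runs, so a leading False element can be absorbed into the next run
theorem pvBest_falseSkip (t : List Bool) (j L : Int) (B : Option (Int × Int)) :
    pvBest (pvRuns (false :: t) j) L B = pvBest (pvRuns t (j + 1)) L B := by
  cases t with
  | nil => simp [pvRuns, pvCountLead, pvBest]
  | cons x u =>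
    cases x with
    | true => simp [pvRuns, pvCountLead, pvBest]
    | false =>
      have hcl : pvCountLead false (false :: u) = pvCountLead false u + 1 := by
        simp [pvCountLead]
      have hL : pvRuns (false :: false :: u) j
          = (j, (1 + (pvCountLead false u + 1 : Nat) : Int), false)
            :: pvRuns (u.drop (pvCountLead false u)) (j + 1 + ((pvCountLead false u + 1 : Nat) : Int)) := by
        rw [pvRuns, hcl]
        simp
      have hR : pvRuns (false :: u) (j + 1)
          = (j + 1, (1 + (pvCountLead false u : Nat) : Int), false)
            :: pvRuns (u.drop (pvCountLead false u)) (j + 1 + 1 + ((pvCountLead false u : Nat) : Int)) := by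
        rw [pvRuns]
      rw [hL, hR, pvBest_false, pvBest_false]
      have h3 : j + 1 + ((pvCountLead false u + 1 : Nat) : Int)
          = j + 1 + 1 + ((pvCountLead false u : Nat) : Int) := by
        push_cast
        ring
      rw [h3]

-- the element just past the counted leading run differs from the run's value
theorem pvCountLead_drop (v : Bool) (r : List Bool) :
    ∀ x t, r.drop (pvCountLead v r) = x :: t → ¬ x = v := by
  induction r with
  | nil => intro x t h; simp at h
  | cons y u ih =>
    intro x t h
    by_cases hy : y = v
    · subst hy
      simp only [pvCountLead, if_pos rfl, List.drop_succ_cons] at h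
      exact ih x t h
    · simp only [pvCountLead, if_neg hy, List.drop_zero] at h
      rcases List.cons.injEq .. ▸ h with ⟨h1, -⟩
      rw [← h1]
      exact hy

-- main invariant: A's loop from a clean state (curStart = none), followed by the fix-up,
-- computes exactly B's strict-max scan over the runs of the remaining suffix
theorem pvMain (n : Nat) : ∀ (xs : List Bool), xs.length ≤ n → ∀ (i L : Int) (B : Option (Int × Int)),
    pvFinA (i + (xs.length : Int)) (pvLoopA xs i L B none) = pvBest (pvRuns xs i) L B := by
  induction n with
  | zero =>
    intro xs hlen i L B
    have hx : xs = [] := List.eq_nil_of_length_eq_zero (Nat.le_zero.mp hlen)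
    subst hx
    simp [pvLoopA, pvFinA, pvRuns, pvBest]
  | succ n ih =>
    intro xs hlen i L B
    match xs with
    | [] => simp [pvLoopA, pvFinA, pvRuns, pvBest]
    | false :: rest =>
      have h1 : pvLoopA (false :: rest) i L B none = pvLoopA rest (i + 1) L B none := by
        simp [pvLoopA]
      rw [h1, pvBest_falseSkip]
      have h2 : i + ((false :: rest).length : Int) = (i + 1) + (rest.length : Int) := by
        simp; ring
      rw [h2]
      exact ih rest (by simpa using Nat.lt_succ_iff.mp (by simpa using hlen)) (i + 1) L B
    | true :: rest =>
      obtain ⟨c, hc⟩ : ∃ c, pvCountLead true rest = c := ⟨_, rfl⟩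
      have hcle : c ≤ rest.length := hc ▸ pvCountLead_le true rest
      have h1 : pvLoopA (true :: rest) i L B none = pvLoopA rest (i + 1) L B (some i) := by
        simp [pvLoopA]
      have hruns : pvRuns (true :: rest) i
          = (i, (1 + c : Int), true) :: pvRuns (rest.drop c) (i + 1 + (c : Int)) := by
        rw [pvRuns, hc]
      rw [h1, pvLoopA_trueRun, hc, hruns]
      rcases hdrop : rest.drop c with _ | ⟨x, t⟩
      · -- the mask ends inside the True run
        have hre : rest.length = c := by
          have hld := congrArg List.length hdrop
          simp at hld
          omega
        have hn : (((true :: rest).length : Nat) : Int) = (c : Int) + 1 := by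
          simp [hre]
        simp only [pvLoopA, pvFinA, pvRuns, pvBest, hn, if_true]
        have h5 : i + ((c : Int) + 1) - i = 1 + (c : Int) := by ring
        have h6 : i + ((c : Int) + 1) - 1 = i + (1 + (c : Int)) - 1 := by ring
        rw [h5, h6]
      · -- the run is followed by at least one element; it must be False
        have hxf : x = false := by
          have := pvCountLead_drop true rest x t (by rw [hc]; exact hdrop)
          cases x
          · rfl
          · exact absurd rfl this
        subst hxf
        -- A's loop closes the run at index i+1+c
        have hclose : pvLoopA (false :: t) (i + 1 + (c : Int)) L B (some i)
            = if (1 + c : Int) > L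
              then pvLoopA t (i + 1 + (c : Int) + 1) (1 + c) (some (i, i + 1 + (c : Int) - 1)) none
              else pvLoopA t (i + 1 + (c : Int) + 1) L B none := by
          simp only [pvLoopA, Bool.false_eq_true, if_false]
          have h4 : i + 1 + (c : Int) - i = (1 + c : Int) := by ring
          rw [h4]
        have hld := congrArg List.length hdrop
        simp at hld
        have hlent' : t.length ≤ n := by
          simp at hlen
          omega
        have hlenfull : i + (((true :: rest).length : Nat) : Int)
            = (i + 1 + (c : Int) + 1) + (t.length : Int) := by
          simp
          push_cast
          omega
        rw [hclose, hlenfull]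
        by_cases hgt : (1 + c : Int) > L
        · rw [if_pos hgt]
          have hB' : i + 1 + (c : Int) - 1 = i + (1 + (c : Int)) - 1 := by ring
          rw [hB']
          rw [ih t hlent' (i + 1 + (c : Int) + 1) (1 + c) (some (i, i + (1 + (c : Int)) - 1))]
          simp [pvBest, hgt, pvBest_falseSkip]
        · rw [if_neg hgt]
          rw [ih t hlent' (i + 1 + (c : Int) + 1) L B]
          simp [pvBest, hgt, pvBest_falseSkip]

-- ===== VERDICT (by name: the statement is the Claim_ definition above) =====
theorem find_largest_gap_spec : Claim_equal_find_largest_gap := by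
  intro valid_mask _
  unfold Spec_find_largest_gap find_largest_gap find_largest_gap_alt
  have := pvMain valid_mask.length valid_mask (le_refl _) 0 0 none
  simpa using this
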